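-- pv_equiv track=rewrite | github.com/Deevo87/asd-algorithms | sorting/bit_algo_sorting/2. zadanie1.py | zad1
-- ===== SOURCE A (Python) =====
-- def parition(A, p, r):
--     x = A[r]
--     i = p - 1
--     for j in range(p, r):
--         if A[j] <= x:
--             i += 1
--             A[i], A[j] = A[j], A[i]
--     A[i+1], A[r] = A[r], A[i+1]
--     return i+1
--
-- def quick_sort(A, p, r):
--     while p < r:
--         q = parition(A, p, r)
--         quick_sort(A, p, q-1)
--         p = q + 1
--
-- def binary_search(A, low, high, k):
--     if high >= low:
--         mid = (low+high)//2
--         if A[mid] == k: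
--             return mid
--         elif A[mid] > k:
--             return binary_search(A, low, mid-1, k)
--         else:
--             return binary_search(A, mid+1, high, k)
--     else:
--         return False
--
-- def zad1(A, B):
--     m = len(B)
--     check = [False]*m
--     quick_sort(B, 0, m-1)
--     for i in A:
--         ind = binary_search(B, 0, m-1, i)
--         if ind is not False:
--             check[ind] = True
--     for i in check:
--         if not i:
--             return False
--     return True
-- ===== SOURCE B (Python) =====
-- def zad1(A, B):
--     # B is sorted in place (B.sort()), matching A's side effect of leaving B ascending.
--     B.sort()
--     for i in range(1, len(B)):
--         if B[i] == B[i - 1]: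
--             return False
--     SA = sorted(A)
--     n = len(SA)
--     j = 0
--     for b in B:
--         while j < n and SA[j] < b:
--             j += 1
--         if j == n or SA[j] != b:
--             return False
--         j += 1
--     return True
-- ===== Notes on version B (the rewrite author's own statement) =====
-- stated objective: faster
-- what changed: A quicksorts B with a hand-written Lomuto quicksort (last-element pivot) and runs a recursive binary search over sorted B for every element of A, marking found indices in a check list; B sorts with the built-in sort, detects duplicates in B by one adjacent-equality scan and verifies B is contained in A with a single two-pointer merge over sorted(A) and sorted B.
import Mathlib
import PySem

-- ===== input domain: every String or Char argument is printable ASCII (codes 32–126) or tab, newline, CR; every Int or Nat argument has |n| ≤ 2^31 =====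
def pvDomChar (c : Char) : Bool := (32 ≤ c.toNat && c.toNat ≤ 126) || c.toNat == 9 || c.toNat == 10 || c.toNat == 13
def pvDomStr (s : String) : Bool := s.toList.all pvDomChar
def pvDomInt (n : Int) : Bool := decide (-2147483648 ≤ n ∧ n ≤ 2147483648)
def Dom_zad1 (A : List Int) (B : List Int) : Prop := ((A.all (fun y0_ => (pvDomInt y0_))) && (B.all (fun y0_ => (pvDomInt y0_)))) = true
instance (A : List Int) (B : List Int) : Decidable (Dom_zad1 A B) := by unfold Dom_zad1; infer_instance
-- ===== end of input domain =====

-- B replaces A's hand-written quicksort + per-element binary search by built-in sorts, an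
-- adjacent-duplicate scan and a single two-pointer merge (objective: alternative algorithm).
-- Both A and B sort the Python argument B in place (the same side effect); the equivalence
-- proved here is about the return value.

-- ===== PORT A =====
def lget (xs : List Int) (i : Int) : Int := PySem.List.pyGetD xs i 0
def lset (xs : List Int) (i : Int) (v : Int) : List Int := PySem.List.pySetD xs i v
def lswap (xs : List Int) (i j : Int) : List Int := lset (lset xs i (lget xs j)) j (lget xs i)

def partStep (x : Int) (st : List Int × Int) (j : Int) : List Int × Int :=
  if lget st.1 j ≤ x then (lswap st.1 (st.2 + 1) j, st.2 + 1) else st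

def partitionPy (xs : List Int) (p r : Int) : List Int × Int :=
  let x := lget xs r
  let st := (PySem.List.pyRange p r).foldl (partStep x) (xs, p - 1)
  (lswap st.1 (st.2 + 1) r, st.2 + 1)

theorem partStep_i_bounds (x : Int) : ∀ (js : List Int) (st : List Int × Int),
    st.2 ≤ (js.foldl (partStep x) st).2 ∧ (js.foldl (partStep x) st).2 ≤ st.2 + js.length := by
  intro js
  induction js with
  | nil => intro st; simp
  | cons j js ih =>
    intro st
    have h := ih (partStep x st j)
    have hstep : st.2 ≤ (partStep x st j).2 ∧ (partStep x st j).2 ≤ st.2 + 1 := by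
      unfold partStep; split <;> simp
    simp only [List.foldl_cons, List.length_cons] at *
    omega

theorem partition_q_bounds (xs : List Int) (p r : Int) (h : p < r) :
    p ≤ (partitionPy xs p r).2 ∧ (partitionPy xs p r).2 ≤ r := by
  unfold partitionPy
  have hb := partStep_i_bounds (lget xs r) (PySem.List.pyRange p r) (xs, p - 1)
  have hlen : ((PySem.List.pyRange p r).length : Int) = r - p := by
    rw [PySem.List.length_pyRange_one]; omega
  simp only at hb ⊢
  omega

def quickSortPy (xs : List Int) (p r : Int) : List Int :=
  if h : p < r then
    let pr := partitionPy xs p r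
    let ys := quickSortPy pr.1 p (pr.2 - 1)
    quickSortPy ys (pr.2 + 1) r
  else xs
termination_by (r - p).toNat
decreasing_by
  · have := partition_q_bounds xs p r h; omega
  · have := partition_q_bounds xs p r h; omega

def bsearchPy (xs : List Int) (low high k : Int) : Option Int :=
  if h : high ≥ low then
    let mid := PySem.Int.floordiv (low + high) 2
    if lget xs mid = k then some mid
    else if lget xs mid > k then bsearchPy xs low (mid - 1) k
    else bsearchPy xs (mid + 1) high k
  else none
termination_by (high - low + 1).toNat
decreasing_by
  · have := PySem.Int.floordiv_two_mid_bounds (h : low ≤ high); omega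
  · have := PySem.Int.floordiv_two_mid_bounds (h : low ≤ high); omega

def markStep (L : List Int) (mi : Int) (ch : List Bool) (a : Int) : List Bool :=
  match bsearchPy L 0 (mi - 1) a with
  | some ind => PySem.List.pySetD ch ind true
  | none => ch

def zad1 (A : List Int) (B : List Int) : Bool :=
  let m : Int := B.length
  let check : List Bool := List.replicate B.length false
  let Bs := quickSortPy B 0 (m - 1)
  let check := A.foldl (markStep Bs m) check
  check.all (fun b => b)

-- ===== PORT B =====
def hasAdjDup : List Int → Bool
  | a :: b :: t => a == b || hasAdjDup (b :: t)
  | _ => false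

def tpMerge : List Int → List Int → Bool
  | _, [] => true
  | [], _ :: _ => false
  | a :: sa, b :: sb =>
    if a < b then tpMerge sa (b :: sb)
    else if a == b then tpMerge sa sb
    else false

def zad1_alt (A : List Int) (B : List Int) : Bool :=
  let Bs := PySem.List.sorted B (fun x => x)
  if hasAdjDup Bs then false
  else tpMerge (PySem.List.sorted A (fun x => x)) Bs

-- ===== PRECONDITION & SPEC =====
def Spec_zad1 (A : List Int) (B : List Int) (out : Bool) : Prop := out = zad1_alt A B
instance (A : List Int) (B : List Int) (out : Bool) : Decidable (Spec_zad1 A B out) := by unfold Spec_zad1; infer_instance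

-- ===== CLAIM (what is proved, stated in full; the proofs are below) =====
def Claim_equal_zad1 : Prop := ∀ (A : List Int) (B : List Int), Dom_zad1 A B → Spec_zad1 A B (zad1 A B)

-- ===== LEMMAS AND PROOFS =====
theorem lget_append (l : List Int) (a : Int) (t : List Int) :
    lget (l ++ a :: t) (l.length : Int) = a := by
  simp [lget, List.getD_eq_getElem?_getD]

theorem lset_append (l : List Int) (a : Int) (t : List Int) (v : Int) :
    lset (l ++ a :: t) (l.length : Int) v = l ++ v :: t := by
  simp [lset, List.set_append_right _ _ (le_refl l.length)]

theorem lswap_mid (l m r : List Int) (a b : Int) :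
    lswap (l ++ a :: m ++ b :: r) (l.length : Int) ((l.length : Int) + 1 + m.length) = l ++ b :: m ++ a :: r := by
  have hj : ((l.length : Int) + 1 + m.length) = ((l ++ a :: m).length : Nat) := by push_cast; simp; ring
  unfold lswap
  have h1 : lget (l ++ a :: m ++ b :: r) (l.length : Int) = a := by
    have := lget_append l a (m ++ b :: r); simpa using this
  have h2 : lget (l ++ a :: m ++ b :: r) ((l.length : Int) + 1 + m.length) = b := by
    rw [hj]
    have := lget_append (l ++ a :: m) b r; simpa using this
  rw [h1, h2]
  have h3 : lset (l ++ a :: m ++ b :: r) (l.length : Int) b = l ++ b :: m ++ b :: r := by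
    have := lset_append l a (m ++ b :: r) b; simpa using this
  rw [h3, hj]
  have h4 : lset ((l ++ b :: m) ++ b :: r) (((l ++ b :: m).length : Nat) : Int) a = (l ++ b :: m) ++ a :: r :=
    lset_append (l ++ b :: m) b r a
  have h5 : (l ++ b :: m) ++ b :: r = l ++ b :: m ++ b :: r := by simp
  have h6 : ((l ++ b :: m).length : Int) = ((l ++ a :: m).length : Int) := by simp
  rw [← h5, h6] at h4
  rw [h4]

theorem lswap_self (xs : List Int) (n : Nat) (h : n < xs.length) :
    lswap xs (n : Int) (n : Int) = xs := by
  unfold lswap lget lset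
  simp [List.getD_eq_getElem?_getD, List.getElem?_eq_getElem h, List.set_getElem_self]

theorem part_fold (x : Int) : ∀ (rest U big w : List Int),
    ∃ big', big'.Perm (big ++ rest.filter (fun e => !decide (e ≤ x))) ∧
      (PySem.List.pyRange ((U.length + big.length : Nat) : Int) ((U.length + big.length + rest.length : Nat) : Int)).foldl
          (partStep x) (U ++ big ++ rest ++ x :: w, (U.length : Int) - 1)
        = (U ++ rest.filter (fun e => decide (e ≤ x)) ++ big' ++ x :: w,
           ((U.length + (rest.filter (fun e => decide (e ≤ x))).length : Nat) : Int) - 1) := by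
  intro rest
  induction rest with
  | nil =>
    intro U big w
    refine ⟨big, by simp, ?_⟩
    rw [PySem.List.pyRange_one_eq_nil (le_of_eq (by simp))]
    simp
  | cons e rest ih =>
    intro U big w
    rw [PySem.List.pyRange_one_cons (by push_cast [List.length_cons]; omega), List.foldl_cons]
    have hget : lget (U ++ big ++ (e :: rest) ++ x :: w) ((U.length + big.length : Nat) : Int) = e := by
      have := lget_append (U ++ big) e (rest ++ x :: w)
      simpa using this
    by_cases he : e ≤ x
    · -- e goes to the small side: swap positions U.length and U.length+big.length
      have hstep : partStep x (U ++ big ++ (e :: rest) ++ x :: w, (U.length : Int) - 1) ((U.length + big.length : Nat) : Int)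
          = ((U ++ [e]) ++ (big.tail ++ big.take 1) ++ rest ++ x :: w, ((U ++ [e]).length : Int) - 1) := by
        unfold partStep
        simp only [hget, if_pos he]
        cases big with
        | nil =>
          have h1 : ((U.length : Int) - 1 + 1) = ((U.length : Nat) : Int) := by omega
          have h2 : ((U.length + ([] : List Int).length : Nat) : Int) = ((U.length : Nat) : Int) := by simp
          rw [h1, h2, lswap_self (U ++ [] ++ (e :: rest) ++ x :: w) U.length (by simp)]
          simp only [Prod.mk.injEq]
          refine ⟨by simp, by push_cast; simp; try omega⟩
        | cons b bs =>
          have h1 : ((U.length : Int) - 1 + 1) = (U.length : Int) := by omega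
          have harg : U ++ (b :: bs) ++ (e :: rest) ++ x :: w = U ++ b :: bs ++ e :: (rest ++ x :: w) := by simp
          have hidx : ((U.length + (b :: bs).length : Nat) : Int) = (U.length : Int) + 1 + bs.length := by
            push_cast [List.length_cons]; ring
          rw [h1, harg, hidx, lswap_mid U bs (rest ++ x :: w) b e]
          simp only [Prod.mk.injEq]
          refine ⟨by simp, by simp⟩
      rw [hstep]
      obtain ⟨big', hp, heq⟩ := ih (U ++ [e]) (big.tail ++ big.take 1) w
      have hlen2 : ((U ++ [e]).length + (big.tail ++ big.take 1).length : Nat) = U.length + big.length + 1 := by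
        cases big <;> simp only [List.length_append, List.length_cons, List.length_nil, List.tail_cons, List.take_succ_cons, List.take_nil, List.tail_nil, List.take_zero] <;> omega
      have hlen3 : (U.length + big.length + 1 + rest.length : Nat) = U.length + big.length + (e :: rest).length := by
        simp only [List.length_cons]; omega
      rw [hlen2] at heq
      rw [hlen3] at heq
      refine ⟨big', ?_, ?_⟩
      · refine hp.trans ?_
        have hf : (e :: rest).filter (fun e => !decide (e ≤ x)) = rest.filter (fun e => !decide (e ≤ x)) := by
          simp [List.filter_cons, he]
        rw [hf]
        refine (List.perm_append_right_iff _).mpr ?_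
        cases big with
        | nil => simp
        | cons b bs =>
          have h : (b :: bs).tail ++ (b :: bs).take 1 = bs ++ [b] := by simp
          rw [h]
          simpa using (List.perm_append_comm (l₁ := bs) (l₂ := [b]))
      · have hf : (e :: rest).filter (fun e => decide (e ≤ x)) = e :: rest.filter (fun e => decide (e ≤ x)) := by
          simp [List.filter_cons, he]
        have hr1 : ((U.length + big.length : Nat) : Int) + 1 = (((U.length + big.length + 1 : Nat)) : Int) := by push_cast; ring
        rw [hf, hr1, heq]
        simp only [Prod.mk.injEq]
        refine ⟨by simp, by simp; ring⟩
    · -- e goes to the big side: state unchanged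
      have hstep : partStep x (U ++ big ++ (e :: rest) ++ x :: w, (U.length : Int) - 1) ((U.length + big.length : Nat) : Int)
          = (U ++ (big ++ [e]) ++ rest ++ x :: w, (U.length : Int) - 1) := by
        unfold partStep
        simp only [hget, if_neg he]
        simp
      rw [hstep]
      obtain ⟨big', hp, heq⟩ := ih U (big ++ [e]) w
      have hlen2 : (U.length + (big ++ [e]).length : Nat) = U.length + big.length + 1 := by simp only [List.length_append, List.length_cons, List.length_nil]; omega
      have hlen3 : (U.length + big.length + 1 + rest.length : Nat) = U.length + big.length + (e :: rest).length := by
        simp only [List.length_cons]; omega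
      rw [hlen2] at heq
      rw [hlen3] at heq
      refine ⟨big', ?_, ?_⟩
      · refine hp.trans ?_
        have hf : (e :: rest).filter (fun e => !decide (e ≤ x)) = e :: rest.filter (fun e => !decide (e ≤ x)) := by
          simp [List.filter_cons, he]
        rw [hf]
        simp
      · have hf : (e :: rest).filter (fun e => decide (e ≤ x)) = rest.filter (fun e => decide (e ≤ x)) := by
          simp [List.filter_cons, he]
        have hr1 : ((U.length + big.length : Nat) : Int) + 1 = (((U.length + big.length + 1 : Nat)) : Int) := by push_cast; ring
        rw [hf, hr1, heq]

theorem partition_spec (u v w : List Int) (x : Int) :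
    ∃ big', big'.Perm (v.filter (fun e => !decide (e ≤ x))) ∧
      partitionPy (u ++ v ++ x :: w) (u.length : Int) ((u.length + v.length : Nat) : Int)
        = (u ++ v.filter (fun e => decide (e ≤ x)) ++ x :: big' ++ w,
           ((u.length + (v.filter (fun e => decide (e ≤ x))).length : Nat) : Int)) := by
  have hx : lget (u ++ v ++ x :: w) ((u.length + v.length : Nat) : Int) = x := by
    have := lget_append (u ++ v) x w; simpa using this
  obtain ⟨big', hp, heq⟩ := part_fold x v u [] w
  simp only [List.length_nil, Nat.add_zero, List.append_nil] at heq hp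
  -- small / big abbreviations
  set sm := v.filter (fun e => decide (e ≤ x)) with hsm
  set bg := v.filter (fun e => !decide (e ≤ x)) with hbg
  have hfold : (PySem.List.pyRange ((u.length : Nat) : Int) ((u.length + v.length : Nat) : Int)).foldl
      (partStep x) (u ++ v ++ x :: w, (u.length : Int) - 1)
      = (u ++ sm ++ big' ++ x :: w, ((u.length + sm.length : Nat) : Int) - 1) := by
    exact heq
  unfold partitionPy
  rw [hx]
  simp only
  rw [hfold]
  have hlensum : sm.length + big'.length = v.length := by
    have h1 := hp.length_eq
    have h2 := (List.filter_append_perm (fun e => decide (e ≤ x)) v).length_eq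
    simp only [List.length_append] at h2
    simp only [List.nil_append] at h1
    beta_reduce at h2
    rw [← hbg] at h2
    rw [← hsm] at h2
    omega
  have hi1 : ((u.length + sm.length : Nat) : Int) - 1 + 1 = ((u.length + sm.length : Nat) : Int) := by omega
  rw [hi1]
  cases hbg' : big' with
  | nil =>
    have hr : ((u.length + v.length : Nat) : Int) = ((u.length + sm.length : Nat) : Int) := by
      subst hbg'; simp at hlensum; simp [hlensum]
    rw [hr]
    rw [lswap_self (u ++ sm ++ [] ++ x :: w) (u.length + sm.length) (by simp)]
    refine ⟨[], by simpa [hbg'] using hp, ?_⟩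
    simp
  | cons b bs =>
    have harg : u ++ sm ++ (b :: bs) ++ x :: w = (u ++ sm) ++ b :: bs ++ x :: w := by simp
    have hr : ((u.length + v.length : Nat) : Int) = (((u ++ sm).length : Nat) : Int) + 1 + bs.length := by
      subst hbg'; simp at hlensum; push_cast; simp; omega
    have hi2 : ((u.length + sm.length : Nat) : Int) = (((u ++ sm).length : Nat) : Int) := by simp
    rw [harg, hr, hi2, lswap_mid (u ++ sm) bs w b x]
    refine ⟨bs ++ [b], ?_, ?_⟩
    · refine List.Perm.trans ?_ hp
      rw [hbg']
      simpa using (List.perm_append_comm (l₁ := bs) (l₂ := [b]))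
    · simp only [Prod.mk.injEq]
      refine ⟨by simp, by simp⟩

theorem qs_aux : ∀ (n : Nat) (v u w : List Int), v.length = n →
    ∃ v', v'.Perm v ∧ v'.Pairwise (· ≤ ·) ∧
      quickSortPy (u ++ v ++ w) (u.length : Int) (((u.length + v.length : Nat) : Int) - 1) = u ++ v' ++ w := by
  intro n
  induction n using Nat.strong_induction_on with
  | _ n ih =>
    intro v u w hv
    by_cases hlen : v.length < 2
    · -- at most one element: quickSortPy is the identity and v is already sorted
      refine ⟨v, List.Perm.refl v, ?_, ?_⟩
      · match v, hlen with
        | [], _ => exact List.Pairwise.nil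
        | [a], _ => simp
      · rw [quickSortPy, dif_neg (by push_cast; omega)]
    · -- v = v₀ ++ [x]: partition about the pivot x, recurse on both sides
      have hne : v ≠ [] := by intro h; rw [h] at hlen; simp at hlen
      obtain ⟨v₀, x, hvx⟩ : ∃ v₀ x, v = v₀ ++ [x] :=
        ⟨v.dropLast, v.getLast hne, (List.dropLast_append_getLast hne).symm⟩
      have hv₀ : 1 ≤ v₀.length := by
        rw [hvx] at hlen; simp only [List.length_append, List.length_cons, List.length_nil] at hlen; omega
      have hsplit : u ++ v ++ w = u ++ v₀ ++ x :: w := by rw [hvx]; simp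
      have hrr : (((u.length + v.length : Nat) : Int) - 1) = ((u.length + v₀.length : Nat) : Int) := by
        rw [hvx]; simp only [List.length_append, List.length_cons, List.length_nil]; push_cast; omega
      obtain ⟨bg, hpbg, heqP⟩ := partition_spec u v₀ w x
      set sm := v₀.filter (fun e => decide (e ≤ x)) with hsm
      have hlsum : sm.length + bg.length = v₀.length := by
        have h1 := hpbg.length_eq
        have h2 := (List.filter_append_perm (fun e => decide (e ≤ x)) v₀).length_eq
        simp only [List.length_append] at h2
        beta_reduce at h2
        rw [← hsm] at h2
        omega
      have hsmlen : sm.length ≤ v₀.length := List.length_filter_le _ _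
      rw [quickSortPy, dif_pos (by rw [hrr]; push_cast; omega)]
      simp only
      rw [hsplit, hrr, heqP]
      simp only [List.append_assoc, List.cons_append]
      -- first recursive call sorts the ≤-pivot block
      obtain ⟨sm', hpsm', hssm', heq1⟩ := ih sm.length (by rw [hvx] at hv; simp at hv; omega)
        sm u (x :: (bg ++ w)) rfl
      simp only [List.append_assoc, List.cons_append] at heq1
      rw [heq1]
      -- second recursive call sorts the >-pivot block
      obtain ⟨bg', hpbg', hsbg', heq2⟩ := ih bg.length (by rw [hvx] at hv; simp at hv; omega)
        bg (u ++ sm' ++ [x]) w rfl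
      have hplen : sm'.length = sm.length := hpsm'.length_eq
      have hp2 : (((u ++ sm' ++ [x]).length : Nat) : Int) = ((u.length + sm.length : Nat) : Int) + 1 := by
        simp only [List.length_append, List.length_cons, List.length_nil, hplen]; push_cast; ring
      have hr2 : (((u ++ sm' ++ [x]).length + bg.length : Nat) : Int) - 1 = ((u.length + v₀.length : Nat) : Int) := by
        simp only [List.length_append, List.length_cons, List.length_nil, hplen]; push_cast; omega
      rw [hp2, hr2] at heq2
      simp only [List.append_assoc, List.cons_append, List.singleton_append, List.nil_append] at heq2
      rw [heq2]
      refine ⟨sm' ++ x :: bg', ?_, ?_, by simp⟩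
      · -- permutation with v = v₀ ++ [x]
        have h1 : (sm' ++ x :: bg').Perm (sm ++ x :: bg) :=
          hpsm'.append ((hpbg'.cons x))
        refine h1.trans ?_
        have h2 : (x :: bg).Perm (bg ++ [x]) := by
          simpa using (List.perm_append_comm (l₁ := [x]) (l₂ := bg))
        refine ((List.Perm.append_left sm h2).trans ?_)
        rw [hvx, ← List.append_assoc]
        refine List.Perm.append_right [x] ?_
        have h3 := List.filter_append_perm (fun e => decide (e ≤ x)) v₀
        beta_reduce at h3
        rw [← hsm] at h3
        exact (hpbg.append_left sm).trans h3
      · -- sortedness of sm' ++ x :: bg'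
        rw [List.pairwise_append]
        refine ⟨hssm', ?_, ?_⟩
        · rw [List.pairwise_cons]
          refine ⟨?_, hsbg'⟩
          intro b hb
          have hbm : b ∈ v₀.filter (fun e => !decide (e ≤ x)) := hpbg.mem_iff.mp (hpbg'.mem_iff.mp hb)
          have := List.of_mem_filter hbm
          simp only [Bool.not_eq_true', decide_eq_false_iff_not] at this
          omega
        · intro a ha t ht
          have ha' : a ∈ sm := hpsm'.mem_iff.mp ha
          have hax : a ≤ x := by simpa using List.of_mem_filter ha'
          rcases List.mem_cons.mp ht with h | h
          · omega
          · have hbm : t ∈ v₀.filter (fun e => !decide (e ≤ x)) := hpbg.mem_iff.mp (hpbg'.mem_iff.mp h)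
            have := List.of_mem_filter hbm
            simp only [Bool.not_eq_true', decide_eq_false_iff_not] at this
            omega

theorem qs_spec : ∀ (v u w : List Int),
    ∃ v', v'.Perm v ∧ v'.Pairwise (· ≤ ·) ∧
      quickSortPy (u ++ v ++ w) (u.length : Int) (((u.length + v.length : Nat) : Int) - 1) = u ++ v' ++ w :=
  fun v u w => qs_aux v.length v u w rfl

theorem lget_elem (xs : List Int) (m : Int) (h0 : 0 ≤ m) (h1 : m < (xs.length : Int)) :
    lget xs m = xs[m.toNat]'(by omega) :=
  PySem.List.pyGetD_eq_getElem xs (0 : Int) h0 h1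

theorem bs_sound_aux (xs : List Int) (k : Int) : ∀ (n : Nat) (low high : Int),
    (high - low + 1).toNat = n → ∀ j, bsearchPy xs low high k = some j →
    low ≤ j ∧ j ≤ high ∧ lget xs j = k := by
  intro n
  induction n using Nat.strong_induction_on with
  | _ n ih =>
    intro low high hn j hj
    rw [bsearchPy] at hj
    by_cases hge : high ≥ low
    · rw [dif_pos hge] at hj
      simp only at hj
      have hm := PySem.Int.floordiv_two_mid_bounds (by omega : low ≤ high)
      split_ifs at hj with hfound hgt
      · cases hj; exact ⟨by omega, by omega, hfound⟩
      · have := ih ((PySem.Int.floordiv (low + high) 2 - 1) - low + 1).toNat (by omega) low _ rfl j hj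
        exact ⟨by omega, by omega, this.2.2⟩
      · have := ih (high - (PySem.Int.floordiv (low + high) 2 + 1) + 1).toNat (by omega) _ high rfl j hj
        exact ⟨by omega, by omega, this.2.2⟩
    · rw [dif_neg hge] at hj
      cases hj

theorem bs_sound (xs : List Int) (k low high j : Int)
    (h : bsearchPy xs low high k = some j) : low ≤ j ∧ j ≤ high ∧ lget xs j = k :=
  bs_sound_aux xs k _ low high rfl j h

theorem bs_complete_aux (xs : List Int) (hs : xs.Pairwise (· ≤ ·)) (k : Int) :
    ∀ (n : Nat) (low high : Int), (high - low + 1).toNat = n →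
    ∀ (i : Nat) (hi : i < xs.length), 0 ≤ low → low ≤ (i : Int) → (i : Int) ≤ high →
      high < xs.length → xs[i] = k → ∃ j, bsearchPy xs low high k = some j := by
  intro n
  induction n using Nat.strong_induction_on with
  | _ n ih =>
    intro low high hn i hi h0 hli hih hhl hik
    have hge : high ≥ low := by omega
    have hm := PySem.Int.floordiv_two_mid_bounds (hge : low ≤ high)
    set mid := PySem.Int.floordiv (low + high) 2 with hmid
    have hmget : lget xs mid = xs[mid.toNat]'(by omega) := lget_elem xs mid (by omega) (by omega)
    rw [bsearchPy, dif_pos hge]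
    simp only [← hmid]
    by_cases hfound : lget xs mid = k
    · rw [if_pos hfound]; exact ⟨mid, rfl⟩
    · rw [if_neg hfound]
      have hg := List.pairwise_iff_getElem.mp hs
      by_cases hgt : lget xs mid > k
      · rw [if_pos hgt]
        -- the witness index lies strictly left of mid
        have hlt : (i : Int) < mid := by
          rcases lt_trichotomy (i : Int) mid with h | h | h
          · exact h
          · exact absurd (by
              rw [hmget]
              have hmi : mid.toNat = i := by omega
              subst hmi
              exact hik) hfound
          · have := hg mid.toNat i (by omega) hi (by omega)
            rw [← hmget] at this; omega
        exact ih ((mid - 1) - low + 1).toNat (by omega) low (mid - 1) rfl i hi h0 hli (by omega) (by omega) hik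
      · rw [if_neg hgt]
        have hlt : mid < (i : Int) := by
          rcases lt_trichotomy (i : Int) mid with h | h | h
          · have := hg i mid.toNat hi (by omega) (by omega)
            rw [← hmget] at this; omega
          · exact absurd (by
              rw [hmget]
              have hmi : mid.toNat = i := by omega
              subst hmi
              exact hik) hfound
          · exact h
        exact ih (high - (mid + 1) + 1).toNat (by omega) (mid + 1) high rfl i hi (by omega) (by omega) hih hhl hik

theorem bs_complete (xs : List Int) (hs : xs.Pairwise (· ≤ ·)) (k : Int)
    (low high : Int) (i : Nat) (hi : i < xs.length) (h0 : 0 ≤ low) (hli : low ≤ (i : Int))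
    (hih : (i : Int) ≤ high) (hhl : high < xs.length) (hik : xs[i] = k) :
    ∃ j, bsearchPy xs low high k = some j :=
  bs_complete_aux xs hs k _ low high rfl i hi h0 hli hih hhl hik

theorem fold_mark (L : List Int) (m : Nat) (hLm : L.length = m) :
    ∀ (A : List Int) (ch : List Bool), ch.length = m →
      (A.foldl (markStep L (m : Int)) ch).length = m ∧
      ∀ i, i < m → (A.foldl (markStep L (m : Int)) ch).getD i false =
        (ch.getD i false || A.any (fun a => bsearchPy L 0 ((m : Int) - 1) a == some (i : Int))) := by
  intro A
  induction A with
  | nil => intro ch hch; simp [hch]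
  | cons a A ihA =>
    intro ch hch
    simp only [List.foldl_cons, List.any_cons]
    cases hbs : bsearchPy L 0 ((m : Int) - 1) a with
    | none =>
      have hms : markStep L (m : Int) ch a = ch := by simp [markStep, hbs]
      rw [hms]
      obtain ⟨hl, hg⟩ := ihA ch hch
      refine ⟨hl, ?_⟩
      intro i h
      rw [hg i h]
      simp
    | some ind =>
      obtain ⟨hind0, hind1, _⟩ := bs_sound L a 0 ((m : Int) - 1) ind hbs
      have hms : markStep L (m : Int) ch a = ch.set ind.toNat true := by
        simp [markStep, hbs, PySem.List.pySetD_of_nonneg ch true hind0]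
      rw [hms]
      obtain ⟨hl, hg⟩ := ihA (ch.set ind.toNat true) (by simp [hch])
      refine ⟨hl, ?_⟩
      intro i h
      rw [hg i h]
      have hindm : ind.toNat < m := by omega
      by_cases hii : i = ind.toNat
      · subst hii
        have hbeq : (some ind == some ((ind.toNat : Nat) : Int)) = true := by
          simp; omega
        rw [hbeq]
        have : (ch.set ind.toNat true).getD ind.toNat false = true := by
          rw [List.getD_eq_getElem _ _ (by simp; omega), List.getElem_set]
          simp
        rw [this]
        simp
      · have h1 : (ch.set ind.toNat true).getD i false = ch.getD i false := by
          rw [List.getD_eq_getElem _ _ (by simp; omega), List.getElem_set,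
              List.getD_eq_getElem _ _ (by omega)]
          simp [Ne.symm hii]
        have h2 : (some ind == some ((i : Nat) : Int)) = false := by
          simp; omega
        rw [h1, h2]
        simp

theorem all_id_iff (l : List Bool) :
    (l.all (fun b => b) = true) ↔ ∀ i, i < l.length → l.getD i false = true := by
  rw [List.all_eq_true]
  constructor
  · intro h i hi
    rw [List.getD_eq_getElem _ _ hi]
    exact h _ (l.getElem_mem hi)
  · intro h x hx
    obtain ⟨i, hi, rfl⟩ := List.mem_iff_getElem.mp hx
    have := h i hi
    rwa [List.getD_eq_getElem _ _ hi] at this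

theorem zad1_eq_true_iff (A B : List Int) (L : List Int) (hperm : L.Perm B)
    (hsort : L.Pairwise (· ≤ ·))
    (hL : quickSortPy B 0 ((B.length : Int) - 1) = L) :
    (zad1 A B = true) ↔ (L.Nodup ∧ ∀ x ∈ L, x ∈ A) := by
  have hlen : L.length = B.length := hperm.length_eq
  unfold zad1
  simp only [hL]
  obtain ⟨hflen, hfg⟩ := fold_mark L B.length hlen A (List.replicate B.length false) (by simp)
  rw [all_id_iff]
  have hstep : (∀ i, i < (A.foldl (markStep L (B.length : Int)) (List.replicate B.length false)).length →
        (A.foldl (markStep L (B.length : Int)) (List.replicate B.length false)).getD i false = true)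
      ↔ ∀ i, i < B.length → A.any (fun a => bsearchPy L 0 ((B.length : Int) - 1) a == some (i : Int)) = true := by
    constructor
    · intro h i hi
      have := h i (by omega)
      rw [hfg i hi] at this
      have hrep : (List.replicate B.length false).getD i false = false := by
        rw [List.getD_eq_getElem _ _ (by simp; omega)]; simp
      rw [hrep, Bool.false_or] at this
      exact this
    · intro h i hi
      rw [hfg i (by omega)]
      have hrep : (List.replicate B.length false).getD i false = false := by
        rw [List.getD_eq_getElem _ _ (by simp; omega)]; simp
      rw [hrep, Bool.false_or]
      exact h i (by omega)
  rw [hstep]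
  constructor
  · intro h
    have hmem : ∀ i, (hi : i < B.length) → L[i]'(by omega) ∈ A ∧
        bsearchPy L 0 ((B.length : Int) - 1) (L[i]'(by omega)) = some (i : Int) := by
      intro i hi
      obtain ⟨a, ha, hae⟩ := List.any_eq_true.mp (h i hi)
      have hae' : bsearchPy L 0 ((B.length : Int) - 1) a = some (i : Int) := by simpa using hae
      obtain ⟨h0, h1, h2⟩ := bs_sound L a 0 ((B.length : Int) - 1) (i : Int) hae'
      have hLa : L[i]'(by omega) = a := by
        have hge := lget_elem L (i : Int) (by omega) (by omega)
        rw [hge] at h2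
        simpa using h2
      rw [hLa]
      exact ⟨ha, hae'⟩
    constructor
    · rw [List.Nodup, List.pairwise_iff_getElem]
      intro i j hi hj hij hLij
      have h1 := (hmem i (by omega)).2
      have h2 := (hmem j (by omega)).2
      rw [hLij] at h1
      rw [h1] at h2
      have : (i : Int) = (j : Int) := Option.some.inj h2
      omega
    · intro x hx
      obtain ⟨i, hi, rfl⟩ := List.mem_iff_getElem.mp hx
      exact (hmem i (by omega)).1
  · rintro ⟨hnd, hsub⟩
    intro i hi
    have hiL : i < L.length := by omega
    have hxA : L[i] ∈ A := hsub _ (L.getElem_mem hiL)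
    obtain ⟨j, hj⟩ := bs_complete L hsort (L[i]) 0 ((B.length : Int) - 1) i hiL
      (le_refl 0) (by omega) (by omega) (by omega) rfl
    obtain ⟨h0, h1, h2⟩ := bs_sound L (L[i]) 0 ((B.length : Int) - 1) j hj
    have hji : j = (i : Int) := by
      have hgj := lget_elem L j h0 (by omega)
      rw [hgj] at h2
      have hinj := List.pairwise_iff_getElem.mp (by rw [← List.Nodup]; exact hnd)
      rcases lt_trichotomy j.toNat i with hlt | heq | hgt
      · exact absurd h2 (hinj j.toNat i (by omega) hiL hlt)
      · omega
      · exact absurd h2.symm (hinj i j.toNat hiL (by omega) hgt)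
    rw [hji] at hj
    exact List.any_eq_true.mpr ⟨L[i], hxA, by simp [hj]⟩

theorem adjdup_iff : ∀ (l : List Int), l.Pairwise (· ≤ ·) → (hasAdjDup l = false ↔ l.Nodup) := by
  intro l
  induction l with
  | nil => intro _; simp [hasAdjDup]
  | cons a t ih =>
    intro h
    rw [List.pairwise_cons] at h
    cases t with
    | nil => simp [hasAdjDup]
    | cons b t' =>
      rw [show hasAdjDup (a :: b :: t') = (a == b || hasAdjDup (b :: t')) from rfl]
      rw [Bool.or_eq_false_iff]
      rw [ih h.2]
      simp only [List.nodup_cons]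
      constructor
      · rintro ⟨hab, hnd⟩
        refine ⟨?_, hnd⟩
        intro hmem
        rcases List.mem_cons.mp hmem with rfl | hmem'
        · simp at hab
        · have hb : a ≤ b := h.1 b (by simp)
          have hba : b ≤ a := by
            have := List.pairwise_cons.mp h.2
            exact this.1 a hmem'
          have : a = b := le_antisymm hb hba
          subst this
          simp at hab
      · rintro ⟨hnm, hnd⟩
        refine ⟨?_, hnd⟩
        simp only [beq_eq_false_iff_ne, ne_eq]
        intro hab
        exact hnm (by rw [hab]; simp)

theorem tpMerge_iff : ∀ (sa sb : List Int), sa.Pairwise (· ≤ ·) → sb.Pairwise (· < ·) →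
    (tpMerge sa sb = true ↔ ∀ x ∈ sb, x ∈ sa) := by
  intro sa
  induction sa with
  | nil =>
    intro sb _ _
    cases sb with
    | nil => simp [tpMerge]
    | cons b sb' =>
      rw [show tpMerge [] (b :: sb') = false from rfl]
      refine iff_of_false (by simp) ?_
      intro hall
      exact absurd (hall b (by simp)) (List.not_mem_nil)
  | cons a sa ih =>
    intro sb hsa hsb
    cases sb with
    | nil => simp [tpMerge]
    | cons b sb' =>
      rw [show tpMerge (a :: sa) (b :: sb') =
        (if a < b then tpMerge sa (b :: sb') else if a == b then tpMerge sa sb' else false) from rfl]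
      have hsa' := (List.pairwise_cons.mp hsa).2
      have hsaa := (List.pairwise_cons.mp hsa).1
      have hsb' := (List.pairwise_cons.mp hsb).2
      have hsbb := (List.pairwise_cons.mp hsb).1
      by_cases hab : a < b
      · rw [if_pos hab, ih (b :: sb') hsa' hsb]
        constructor
        · intro h x hx
          exact List.mem_cons_of_mem a (h x hx)
        · intro h x hx
          have hxb : b ≤ x := by
            rcases List.mem_cons.mp hx with rfl | hx'
            · exact le_refl x
            · exact le_of_lt (hsbb x hx')
          rcases List.mem_cons.mp (h x hx) with rfl | hx'
          · omega
          · exact hx'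
      · rw [if_neg hab]
        by_cases haeb : a = b
        · subst haeb
          rw [if_pos (by simp), ih sb' hsa' hsb']
          constructor
          · intro h x hx
            rcases List.mem_cons.mp hx with rfl | hx'
            · exact List.mem_cons_self
            · exact List.mem_cons_of_mem a (h x hx')
          · intro h x hx
            have hax : a < x := hsbb x hx
            rcases List.mem_cons.mp (h x (List.mem_cons_of_mem a hx)) with rfl | hx'
            · omega
            · exact hx'
        · rw [if_neg (by simpa using haeb)]
          refine iff_of_false (by simp) ?_
          intro hall
          have hb := hall b (by simp)
          rcases List.mem_cons.mp hb with rfl | hb'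
          · exact haeb rfl
          · have := hsaa b hb'
            omega

theorem zad1_alt_eq_true_iff (A B : List Int) :
    (zad1_alt A B = true) ↔ (B.Nodup ∧ ∀ x ∈ B, x ∈ A) := by
  unfold zad1_alt
  simp only
  have hBs := PySem.List.sorted_pairwise B (fun x => x)
  have hBp : (PySem.List.sorted B (fun x => x)).Perm B := PySem.List.sorted_perm B (fun x => x) false
  have hnd := adjdup_iff (PySem.List.sorted B (fun x => x)) hBs
  by_cases hdup : hasAdjDup (PySem.List.sorted B (fun x => x)) = true
  · rw [if_pos hdup]
    refine iff_of_false (by simp) ?_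
    rintro ⟨hBnd, -⟩
    have : (PySem.List.sorted B (fun x => x)).Nodup := hBp.nodup_iff.mpr hBnd
    rw [← hnd] at this
    rw [this] at hdup
    simp at hdup
  · rw [if_neg hdup]
    have hBsnd : (PySem.List.sorted B (fun x => x)).Nodup := hnd.mp (by simpa using hdup)
    have hBnd : B.Nodup := hBp.nodup_iff.mp hBsnd
    have hAs := PySem.List.sorted_pairwise A (fun x => x)
    have hAp : (PySem.List.sorted A (fun x => x)).Perm A := PySem.List.sorted_perm A (fun x => x) false
    have hstrict : (PySem.List.sorted B (fun x => x)).Pairwise (· < ·) := by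
      have hne : (PySem.List.sorted B (fun x => x)).Pairwise (· ≠ ·) := hBsnd
      refine List.Pairwise.imp₂ ?_ hBs hne
      intro a b h1 h2
      exact lt_of_le_of_ne h1 h2
    rw [tpMerge_iff _ _ hAs hstrict]
    constructor
    · intro h
      refine ⟨hBnd, ?_⟩
      intro x hx
      exact hAp.mem_iff.mp (h x (hBp.mem_iff.mpr hx))
    · rintro ⟨_, h⟩
      intro x hx
      exact hAp.mem_iff.mpr (h x (hBp.mem_iff.mp hx))

-- ===== VERDICT (by name: the statement is the Claim_ definition above) =====
theorem zad1_spec : Claim_equal_zad1 := by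
  intro A B _
  unfold Spec_zad1
  obtain ⟨L, hperm, hsort, hL⟩ := qs_spec B [] []
  simp only [List.nil_append, List.append_nil, List.length_nil, Nat.zero_add, Nat.cast_zero] at hL
  have hL' : quickSortPy B 0 ((B.length : Int) - 1) = L := by
    rw [← hL]
  rw [Bool.eq_iff_iff]
  rw [zad1_eq_true_iff A B L hperm hsort hL', zad1_alt_eq_true_iff A B]
  constructor
  · rintro ⟨h1, h2⟩
    exact ⟨hperm.nodup_iff.mp h1, fun x hx => h2 x (hperm.mem_iff.mpr hx)⟩
  · rintro ⟨h1, h2⟩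
    exact ⟨hperm.nodup_iff.mpr h1, fun x hx => h2 x (hperm.mem_iff.mp hx)⟩
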